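-- pv_equiv track=rewrite | github.com/triet4p/lerobot | src/lerobot/gui/rtc_xvla_control_gui.py | _find_left_turn_joint
-- ===== SOURCE A (Python) =====
-- def _find_left_turn_joint(joint_names: list[str]) -> str | None:
--     candidates = [
--         "shoulder_pan",
--         "base",
--         "waist",
--         "yaw",
--         "joint_1",
--         "joint1",
--     ]
--
--     lower_names = {name.lower(): name for name in joint_names}
--     for token in candidates:
--         for lower_name, original in lower_names.items():
--             if token in lower_name and "gripper" not in lower_name and "jaw" not in lower_name:
--                 return original
--
--     for name in joint_names:
--         lname = name.lower()
--         if "gripper" not in lname and "jaw" not in lname: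
--             return name
--     return None
-- ===== SOURCE B (Python) =====
-- def _find_left_turn_joint(joint_names: list[str]) -> str | None:
--     candidates = [
--         "shoulder_pan",
--         "base",
--         "waist",
--         "yaw",
--         "joint_1",
--         "joint1",
--     ]
--
--     best = None  # (priority, name), minimal priority, first-seen wins ties
--     for name in joint_names:
--         lname = name.lower()
--         if "gripper" in lname or "jaw" in lname:
--             continue
--         prio = next((i for i, t in enumerate(candidates) if t in lname), len(candidates))
--         if best is None or prio < best[0]:
--             best = (prio, name)
--     return None if best is None else best[1]
-- ===== Notes on version B (the rewrite author's own statement) =====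
-- stated objective: simpler
-- what changed: Replaces A's lowercase-keyed dict plus nested token-by-token scans plus a separate fallback loop with a single pass over joint_names that scores each eligible name by the index of the first candidate token it contains (sentinel len(candidates) for none) and keeps the first-seen minimum.
-- outside the precondition, e.g. on _find_left_turn_joint(['Base', 'BASE']): A returns 'BASE', B returns 'Base'
import Mathlib
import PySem

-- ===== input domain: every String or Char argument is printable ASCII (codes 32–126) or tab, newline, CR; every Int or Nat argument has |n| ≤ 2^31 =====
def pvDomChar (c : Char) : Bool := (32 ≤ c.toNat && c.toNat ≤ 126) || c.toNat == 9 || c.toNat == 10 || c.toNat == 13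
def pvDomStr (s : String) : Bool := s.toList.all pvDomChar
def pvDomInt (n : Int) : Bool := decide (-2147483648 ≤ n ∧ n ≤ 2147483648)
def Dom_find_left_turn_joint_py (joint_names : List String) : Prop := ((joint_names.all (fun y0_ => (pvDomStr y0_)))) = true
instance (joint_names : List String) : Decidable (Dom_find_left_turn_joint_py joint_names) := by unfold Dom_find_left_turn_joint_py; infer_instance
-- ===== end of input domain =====

-- B replaces A's lowercase-keyed dict, nested token loops and separate fallback loop by one
-- pass that scores each eligible name by the index of the first candidate token it contains
-- (objective: simpler, same asymptotic cost).

-- ===== PORT A =====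
def find_left_turn_joint_py (joint_names : List String) : Option String :=
  let candidates : List String := ["shoulder_pan", "base", "waist", "yaw", "joint_1", "joint1"]
  let lower_names : PySem.Dict String String :=
    joint_names.foldl (fun d name => d.insert (PySem.Str.lower name) name) PySem.Dict.empty
  match candidates.findSome? (fun token =>
      (PySem.Dict.items lower_names).findSome? (fun kv =>
        if PySem.Str.isIn token kv.1 &&
            (!PySem.Str.isIn "gripper" kv.1 && !PySem.Str.isIn "jaw" kv.1)
        then some kv.2 else none)) with
  | some original => some original
  | none =>
    joint_names.findSome? (fun name =>
      let lname := PySem.Str.lower name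
      if !PySem.Str.isIn "gripper" lname && !PySem.Str.isIn "jaw" lname
      then some name else none)

-- ===== PORT B =====
def find_left_turn_joint_py_alt (joint_names : List String) : Option String :=
  let candidates : List String := ["shoulder_pan", "base", "waist", "yaw", "joint_1", "joint1"]
  let best := joint_names.foldl (fun best name =>
    let lname := PySem.Str.lower name
    if PySem.Str.isIn "gripper" lname || PySem.Str.isIn "jaw" lname then best
    else
      let prio := (candidates.findIdx? (fun t => PySem.Str.isIn t lname)).getD candidates.length
      match best with
      | none => some (prio, name)
      | some b => if prio < b.1 then some (prio, name) else best) none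
  best.map (·.2)

-- ===== PRECONDITION & SPEC =====
-- Pre_ excludes lists containing two DISTINCT names that are equal after lowercasing: there
-- A's dict keyed by name.lower() accidentally keeps the LAST case-variant's spelling
-- (dict-overwrite order), a corner where B's first-seen spelling is as defensible.
def Pre_find_left_turn_joint_py (joint_names : List String) : Prop :=
  ∀ a ∈ joint_names, ∀ b ∈ joint_names, PySem.Str.lower a = PySem.Str.lower b → a = b
instance (joint_names : List String) : Decidable (Pre_find_left_turn_joint_py joint_names) := by
  unfold Pre_find_left_turn_joint_py; infer_instance
def pvWitness_find_left_turn_joint_py : List String := ["gripper_x", "shoulder_pan_joint", "elbow"]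

def Spec_find_left_turn_joint_py (joint_names : List String) (out : Option String) : Prop := out = find_left_turn_joint_py_alt joint_names
instance (joint_names : List String) (out : Option String) : Decidable (Spec_find_left_turn_joint_py joint_names out) := by unfold Spec_find_left_turn_joint_py; infer_instance

-- ===== CLAIM (what is proved, stated in full; the proofs are below) =====
def Claim_equal_find_left_turn_joint_py : Prop := ∀ (joint_names : List String), Dom_find_left_turn_joint_py joint_names → Pre_find_left_turn_joint_py joint_names → Spec_find_left_turn_joint_py joint_names (find_left_turn_joint_py joint_names)

-- ===== LEMMAS AND PROOFS =====

-- Proof-side names for the shared pieces of the two programs.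
def pvCands : List String := ["shoulder_pan", "base", "waist", "yaw", "joint_1", "joint1"]

def pvElig (l : String) : Bool := !PySem.Str.isIn "gripper" l && !PySem.Str.isIn "jaw" l

def pvP (t n : String) : Bool :=
  PySem.Str.isIn t (PySem.Str.lower n) && pvElig (PySem.Str.lower n)

def pvPrio (n : String) : Nat :=
  (pvCands.findIdx? (fun t => PySem.Str.isIn t (PySem.Str.lower n))).getD pvCands.length

-- A's algorithm once the dict is eliminated: staged scans over the tokens, then the fallback.
def pvStageScan (ts js : List String) : Option String :=
  ts.findSome? (fun t => js.find? (pvP t))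

def pvAnorm (js : List String) : Option String :=
  match pvStageScan pvCands js with
  | some m => some m
  | none => js.find? (fun n => pvElig (PySem.Str.lower n))

-- "try each token of ts on js; if none matches, settle for n"
def pvStagedUpto (ts js : List String) (n : String) : Option String :=
  match ts with
  | [] => some n
  | t :: ts' =>
    match js.find? (pvP t) with
    | some m => some m
    | none => pvStagedUpto ts' js n

-- B's fold step, named.
def pvStep (best : Option (Nat × String)) (name : String) : Option (Nat × String) :=
  if PySem.Str.isIn "gripper" (PySem.Str.lower name) || PySem.Str.isIn "jaw" (PySem.Str.lower name) then best
  else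
    match best with
    | none => some (pvPrio name, name)
    | some b => if pvPrio name < b.1 then some (pvPrio name, name) else best

theorem pv_findSome?_guard {α : Type} (p : α → Bool) (l : List α) :
    l.findSome? (fun x => if p x then some x else none) = l.find? p := by
  induction l with
  | nil => rfl
  | cons a l ih => by_cases h : p a = true <;> simp [List.findSome?_cons, h, ih]

theorem pv_findSome?_congr {α β : Type} {f g : α → Option β} {l : List α}
    (h : ∀ x ∈ l, f x = g x) : l.findSome? f = l.findSome? g := by
  induction l with
  | nil => rfl
  | cons a l ih =>
    simp only [List.findSome?_cons, h a (by simp)]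
    cases g a with
    | some b => rfl
    | none => exact ih (fun x hx => h x (by simp [hx]))

theorem pv_findSome?_singleton {α β : Type} (f : α → Option β) (x : α) :
    [x].findSome? f = f x := by
  cases hf : f x <;> simp [List.findSome?_cons, hf]

-- Boolean bridges between B's guard and A's eligibility test.
theorem pvElig_true_of_guard {m : String}
    (hg : ¬ (PySem.Str.isIn "gripper" (PySem.Str.lower m)
            || PySem.Str.isIn "jaw" (PySem.Str.lower m)) = true) :
    pvElig (PySem.Str.lower m) = true := by
  simp only [Bool.or_eq_true, not_or, Bool.not_eq_true] at hg
  unfold pvElig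
  rw [hg.1, hg.2]
  rfl

theorem pvElig_false_of_guard {m : String}
    (hg : (PySem.Str.isIn "gripper" (PySem.Str.lower m)
            || PySem.Str.isIn "jaw" (PySem.Str.lower m)) = true) :
    pvElig (PySem.Str.lower m) = false := by
  unfold pvElig
  rcases Bool.or_eq_true_iff.mp hg with h | h <;>
    rw [h] <;> simp only [Bool.not_true, Bool.false_and, Bool.and_false]

theorem pvP_false_of_guard {m : String} (t : String)
    (hg : (PySem.Str.isIn "gripper" (PySem.Str.lower m)
            || PySem.Str.isIn "jaw" (PySem.Str.lower m)) = true) :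
    pvP t m = false := by
  unfold pvP
  rw [pvElig_false_of_guard hg]
  simp only [Bool.and_false]

-- ---------- Step 1: eliminating the dict (the only step that uses Pre_) ----------

theorem pv_dict_scan (f : String × String → Option String) :
    ∀ (js : List String) (d : PySem.Dict String String),
    (∀ n ∈ js, ∀ p ∈ PySem.Dict.items d, p.1 = PySem.Str.lower n → p.2 = n) →
    (∀ a ∈ js, ∀ b ∈ js, PySem.Str.lower a = PySem.Str.lower b → a = b) →
    (PySem.Dict.items (js.foldl (fun d name => d.insert (PySem.Str.lower name) name) d)).findSome? f
      = match (PySem.Dict.items d).findSome? f with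
        | some r => some r
        | none => js.findSome? (fun n =>
            if PySem.Dict.contains d (PySem.Str.lower n) then none else f (PySem.Str.lower n, n)) := by
  intro js
  induction js with
  | nil =>
    intro d _ _
    simp only [List.foldl_nil, List.findSome?_nil]
    cases (PySem.Dict.items d).findSome? f <;> rfl
  | cons n rest ih =>
    intro d hval hpre
    by_cases hc : PySem.Dict.contains d (PySem.Str.lower n) = true
    · -- key already present: by Pre_ its stored value is n itself, so the insert is a no-op
      have hins : d.insert (PySem.Str.lower n) n = d := by
        apply PySem.Dict.ext
        rw [PySem.Dict.items_insert]
        simp only [hc, if_true]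
        refine (List.map_congr_left ?_).trans (List.map_id _)
        intro p hp
        by_cases hk : p.1 = PySem.Str.lower n
        · have hv := hval n (by simp) p hp hk
          cases p; simp_all
        · simp [hk]
      rw [List.foldl_cons, hins,
        ih d (fun m hm => hval m (by simp [hm])) (fun a ha b hb => hpre a (by simp [ha]) b (by simp [hb]))]
      cases (PySem.Dict.items d).findSome? f with
      | some r => rfl
      | none => simp [List.findSome?_cons, hc]
    · -- fresh key: the entry (lower n, n) is appended
      have hc' : PySem.Dict.contains d (PySem.Str.lower n) = false := by
        simpa using hc
      have hitems : PySem.Dict.items (d.insert (PySem.Str.lower n) n)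
          = PySem.Dict.items d ++ [(PySem.Str.lower n, n)] := by
        rw [PySem.Dict.items_insert, hc']; simp
      have hval' : ∀ m ∈ rest, ∀ p ∈ PySem.Dict.items (d.insert (PySem.Str.lower n) n),
          p.1 = PySem.Str.lower m → p.2 = m := by
        intro m hm p hp hk
        rw [hitems] at hp
        rcases List.mem_append.mp hp with h | h
        · exact hval m (by simp [hm]) p h hk
        · simp only [List.mem_singleton] at h
          subst h
          have := hpre n (by simp) m (by simp [hm]) (by simpa using hk)
          simpa using this
      rw [List.foldl_cons,
        ih (d.insert (PySem.Str.lower n) n) hval'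
          (fun a ha b hb => hpre a (by simp [ha]) b (by simp [hb]))]
      rw [hitems, List.findSome?_append]
      cases hscan : (PySem.Dict.items d).findSome? f with
      | some r => rfl
      | none =>
        show (match [(PySem.Str.lower n, n)].findSome? f with
              | some r => some r
              | none => rest.findSome? (fun m =>
                  if PySem.Dict.contains (d.insert (PySem.Str.lower n) n) (PySem.Str.lower m)
                  then none else f (PySem.Str.lower m, m)))
            = _
        rw [pv_findSome?_singleton]
        rw [List.findSome?_cons]
        simp only [hc', Bool.false_eq_true, if_false]
        cases hf : f (PySem.Str.lower n, n) with
        | some r => rfl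
        | none =>
          apply pv_findSome?_congr
          intro m hm
          by_cases hk : PySem.Str.lower m = PySem.Str.lower n
          · have hmn : m = n := hpre m (by simp [hm]) n (by simp) hk
            subst hmn
            rw [hk]
            simp [PySem.Dict.contains_insert, hc', hf]
          · simp [PySem.Dict.contains_insert, hk]

-- ---------- Step 2: the first-matching-index (pvPrio) characterisation ----------

theorem pv_findIdx_spec {α : Type} (p : α → Bool) (l : List α) :
    (∀ t ∈ l.take ((l.findIdx? p).getD l.length), p t = false) ∧
    ((l.findIdx? p).getD l.length = l.length ∨
      ∃ t rest, l.drop ((l.findIdx? p).getD l.length) = t :: rest ∧ p t = true) := by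
  induction l with
  | nil => simp
  | cons a l ih =>
    by_cases ha : p a = true
    · simp [List.findIdx?_cons, ha]
    · have hq : ((a :: l).findIdx? p).getD (a :: l).length
          = ((l.findIdx? p).getD l.length) + 1 := by
        cases h : l.findIdx? p <;> simp [List.findIdx?_cons, ha, h]
      rw [hq]
      constructor
      · intro t ht
        simp only [List.take_succ_cons, List.mem_cons] at ht
        rcases ht with rfl | ht
        · simpa using ha
        · exact ih.1 t ht
      · rcases ih.2 with h | ⟨t, rest, hdrop, hpt⟩
        · left; simp [h]
        · right; exact ⟨t, rest, by simpa using hdrop, hpt⟩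

theorem pvPrio_take (n : String) :
    ∀ t ∈ pvCands.take (pvPrio n), PySem.Str.isIn t (PySem.Str.lower n) = false :=
  (pv_findIdx_spec (fun t => PySem.Str.isIn t (PySem.Str.lower n)) pvCands).1

theorem pvPrio_drop (n : String) :
    pvPrio n = pvCands.length ∨
      ∃ t rest, pvCands.drop (pvPrio n) = t :: rest ∧ PySem.Str.isIn t (PySem.Str.lower n) = true :=
  (pv_findIdx_spec (fun t => PySem.Str.isIn t (PySem.Str.lower n)) pvCands).2

theorem pvP_false_of_take {n u : String} (hu : u ∈ pvCands.take (pvPrio n)) :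
    pvP u n = false := by
  unfold pvP
  rw [pvPrio_take n u hu]
  simp only [Bool.false_and]

-- ---------- Step 3: the staged scan vs the running-minimum fold ----------

theorem pvStagedUpto_skip (ts : List String) (js : List String) (m n : String)
    (h : ∀ t ∈ ts, pvP t m = false) :
    pvStagedUpto ts (m :: js) n = pvStagedUpto ts js n := by
  induction ts with
  | nil => rfl
  | cons t ts ih =>
    simp only [pvStagedUpto]
    rw [List.find?_cons_of_neg (by rw [h t (by simp)]; exact Bool.false_ne_true)]
    cases js.find? (pvP t) with
    | some r => rfl
    | none => exact ih (fun u hu => h u (by simp [hu]))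

theorem pvStagedUpto_hit (d1 : List String) (d2 js : List String) (t m n : String)
    (hd1 : ∀ u ∈ d1, pvP u m = false) (ht : pvP t m = true) :
    pvStagedUpto (d1 ++ t :: d2) (m :: js) n = pvStagedUpto d1 js m := by
  induction d1 with
  | nil =>
    simp only [List.nil_append, pvStagedUpto]
    rw [List.find?_cons_of_pos ht]
  | cons u d1 ih =>
    simp only [List.cons_append, pvStagedUpto]
    rw [List.find?_cons_of_neg (by rw [hd1 u (by simp)]; exact Bool.false_ne_true)]
    cases js.find? (pvP u) with
    | some r => rfl
    | none => exact ih (fun v hv => hd1 v (by simp [hv]))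

theorem pvStagedUpto_eq_match (ts js : List String) (n : String) :
    pvStagedUpto ts js n = match pvStageScan ts js with
      | some m => some m
      | none => some n := by
  induction ts with
  | nil => rfl
  | cons t ts ih =>
    simp only [pvStagedUpto, pvStageScan, List.findSome?_cons]
    cases js.find? (pvP t) with
    | some r => rfl
    | none => exact ih

theorem pvStageScan_nil (ts : List String) : pvStageScan ts [] = none := by
  induction ts with
  | nil => rfl
  | cons t ts ih => simpa [pvStageScan, List.findSome?_cons] using ih

theorem pv_fold_some :
    ∀ (js : List String) (n : String) (ts1 ts2 : List String),
    pvCands = ts1 ++ ts2 → pvPrio n = ts1.length →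
    (js.foldl pvStep (some (ts1.length, n))).map (·.2) = pvStagedUpto ts1 js n := by
  intro js
  induction js with
  | nil =>
    intro n ts1 ts2 hc hp
    rw [pvStagedUpto_eq_match, pvStageScan_nil]
    rfl
  | cons m rest ih =>
    intro n ts1 ts2 hc hp
    have hts1len : ts1.length ≤ pvCands.length := by
      rw [hc]; simp
    have hts1 : ts1 = pvCands.take ts1.length := by
      rw [hc, List.take_left]
    rw [List.foldl_cons]
    by_cases hg : (PySem.Str.isIn "gripper" (PySem.Str.lower m)
        || PySem.Str.isIn "jaw" (PySem.Str.lower m)) = true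
    · rw [show pvStep (some (ts1.length, n)) m = some (ts1.length, n) from by
        unfold pvStep; rw [if_pos hg]]
      rw [ih n ts1 ts2 hc hp]
      exact (pvStagedUpto_skip ts1 rest m n (fun t _ => pvP_false_of_guard t hg)).symm
    · have helig := pvElig_true_of_guard hg
      have hstep : pvStep (some (ts1.length, n)) m
          = if pvPrio m < ts1.length then some (pvPrio m, m) else some (ts1.length, n) := by
        unfold pvStep; rw [if_neg hg]
      by_cases hq : pvPrio m < ts1.length
      · -- a strictly better name: the accumulator advances
        rcases pvPrio_drop m with h | ⟨t, rest', hdrop, hisin⟩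
        · omega
        have hqlen : pvPrio m < pvCands.length := by
          by_contra hh
          rw [List.drop_eq_nil_of_le (by omega)] at hdrop
          exact (List.cons_ne_nil _ _) hdrop.symm
        have hlen_take : (pvCands.take (pvPrio m)).length = pvPrio m := by
          rw [List.length_take]; omega
        have ihm := ih m (pvCands.take (pvPrio m)) (pvCands.drop (pvPrio m))
          (List.take_append_drop _ _).symm hlen_take.symm
        rw [hlen_take] at ihm
        rw [hstep, if_pos hq, ihm]
        have hsplit : ts1 = pvCands.take (pvPrio m) ++ t :: (rest'.take (ts1.length - pvPrio m - 1)) := by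
          have h1 : pvCands.take ts1.length
              = pvCands.take (pvPrio m) ++ (pvCands.drop (pvPrio m)).take (ts1.length - pvPrio m) := by
            rw [← List.take_add]
            congr 1
            omega
          conv_lhs => rw [hts1, h1, hdrop,
            show ts1.length - pvPrio m = (ts1.length - pvPrio m - 1) + 1 from by omega,
            List.take_succ_cons]
        rw [hsplit]
        exact (pvStagedUpto_hit _ _ _ _ _ _ (fun u hu => pvP_false_of_take hu)
          (by unfold pvP; rw [hisin, helig]; rfl)).symm
      · -- not strictly better: the accumulator stays
        rw [hstep, if_neg hq, ih n ts1 ts2 hc hp]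
        refine (pvStagedUpto_skip ts1 rest m n (fun t ht => ?_)).symm
        have h1 : ts1 = (pvCands.take (pvPrio m)).take ts1.length := by
          rw [List.take_take, Nat.min_eq_left (by omega), ← hts1]
        exact pvP_false_of_take (List.take_subset _ _ (h1 ▸ ht))

-- ---------- Step 4: pvAnorm equals B's fold ----------

theorem pv_norm_eq : ∀ js : List String, pvAnorm js = (js.foldl pvStep none).map (·.2) := by
  intro js
  induction js with
  | nil => simp [pvAnorm, pvStageScan_nil]
  | cons n rest ih =>
    rw [List.foldl_cons]
    by_cases hg : (PySem.Str.isIn "gripper" (PySem.Str.lower n)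
        || PySem.Str.isIn "jaw" (PySem.Str.lower n)) = true
    · -- ineligible: invisible to every scan and to the fold
      rw [show pvStep none n = none from by unfold pvStep; rw [if_pos hg], ← ih]
      unfold pvAnorm
      have hscan : pvStageScan pvCands (n :: rest) = pvStageScan pvCands rest := by
        apply pv_findSome?_congr
        intro t _
        rw [List.find?_cons_of_neg (by rw [pvP_false_of_guard t hg]; exact Bool.false_ne_true)]
      rw [hscan]
      cases pvStageScan pvCands rest with
      | some r => rfl
      | none =>
        show (n :: rest).find? (fun n => pvElig (PySem.Str.lower n)) = _
        rw [List.find?_cons_of_neg (by rw [pvElig_false_of_guard hg]; exact Bool.false_ne_true)]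
    · have helig := pvElig_true_of_guard hg
      rw [show pvStep none n = some (pvPrio n, n) from by unfold pvStep; rw [if_neg hg]]
      rcases pvPrio_drop n with hlen | ⟨t, rest', hdrop, hisin⟩
      · -- n matches no token: every stage skips n, the fallback takes it
        have hfold := pv_fold_some rest n pvCands [] (by simp) hlen
        rw [← hlen] at hfold
        rw [hfold]
        unfold pvAnorm
        have hscan : pvStageScan pvCands (n :: rest) = pvStageScan pvCands rest := by
          apply pv_findSome?_congr
          intro t ht
          have hmem : t ∈ pvCands.take (pvPrio n) := by
            rw [hlen, List.take_length]; exact ht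
          rw [List.find?_cons_of_neg (by rw [pvP_false_of_take hmem]; exact Bool.false_ne_true)]
        rw [hscan, pvStagedUpto_eq_match]
        cases pvStageScan pvCands rest with
        | some r => rfl
        | none =>
          show (n :: rest).find? (fun n => pvElig (PySem.Str.lower n)) = _
          rw [List.find?_cons_of_pos (p := fun n => pvElig (PySem.Str.lower n)) helig]
      · -- n matches the token at index pvPrio n: that stage returns it
        have hqlen : pvPrio n < pvCands.length := by
          by_contra hh
          rw [List.drop_eq_nil_of_le (by omega)] at hdrop
          exact (List.cons_ne_nil _ _) hdrop.symm
        have hlen_take : (pvCands.take (pvPrio n)).length = pvPrio n := by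
          rw [List.length_take]; omega
        have hfold := pv_fold_some rest n (pvCands.take (pvPrio n)) (pvCands.drop (pvPrio n))
          (List.take_append_drop _ _).symm hlen_take.symm
        rw [hlen_take] at hfold
        rw [hfold]
        have hsplitCands : pvCands = pvCands.take (pvPrio n) ++ t :: rest' := by
          conv_lhs => rw [← List.take_append_drop (pvPrio n) pvCands]
          rw [hdrop]
        have hkey : pvStageScan pvCands (n :: rest)
            = match pvStageScan (pvCands.take (pvPrio n)) rest with
              | some r => some r
              | none => some n := by
          conv_lhs => rw [hsplitCands]
          unfold pvStageScan
          rw [List.findSome?_append]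
          have hd1 : (pvCands.take (pvPrio n)).findSome? (fun u => (n :: rest).find? (pvP u))
              = (pvCands.take (pvPrio n)).findSome? (fun u => rest.find? (pvP u)) := by
            apply pv_findSome?_congr
            intro u hu
            rw [List.find?_cons_of_neg (by rw [pvP_false_of_take hu]; exact Bool.false_ne_true)]
          rw [hd1]
          cases hx : (pvCands.take (pvPrio n)).findSome? (fun u => rest.find? (pvP u)) with
          | some r => rfl
          | none =>
            show (t :: rest').findSome? (fun u => (n :: rest).find? (pvP u)) = some n
            rw [List.findSome?_cons,
              List.find?_cons_of_pos (show pvP t n = true from by unfold pvP; rw [hisin, helig]; rfl)]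
        unfold pvAnorm
        rw [hkey, pvStagedUpto_eq_match]
        cases pvStageScan (pvCands.take (pvPrio n)) rest with
        | some r => rfl
        | none => rfl

-- ---------- Step 5: the two ports in terms of the normal forms ----------

theorem portB_eq (js : List String) :
    find_left_turn_joint_py_alt js = (js.foldl pvStep none).map (·.2) := rfl

theorem portA_eq (js : List String)
    (hpre : ∀ a ∈ js, ∀ b ∈ js, PySem.Str.lower a = PySem.Str.lower b → a = b) :
    find_left_turn_joint_py js = pvAnorm js := by
  have hscan : ∀ t : String,
      (PySem.Dict.items (js.foldl (fun d name => d.insert (PySem.Str.lower name) name)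
          PySem.Dict.empty)).findSome? (fun kv =>
        if PySem.Str.isIn t kv.1 &&
            (!PySem.Str.isIn "gripper" kv.1 && !PySem.Str.isIn "jaw" kv.1)
        then some kv.2 else none)
      = js.find? (pvP t) := by
    intro t
    rw [pv_dict_scan _ js PySem.Dict.empty (by
      intro n _ p hp
      rw [show PySem.Dict.items (PySem.Dict.empty : PySem.Dict String String) = [] from rfl] at hp
      simp at hp) hpre]
    have hempty : PySem.Dict.items (PySem.Dict.empty : PySem.Dict String String) = [] := rfl
    rw [hempty]
    simp only [List.findSome?_nil]
    rw [show (fun n => if PySem.Dict.contains (PySem.Dict.empty : PySem.Dict String String)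
          (PySem.Str.lower n) then none
        else if PySem.Str.isIn t (PySem.Str.lower n) &&
            (!PySem.Str.isIn "gripper" (PySem.Str.lower n) && !PySem.Str.isIn "jaw" (PySem.Str.lower n))
          then some n else none)
      = (fun n => if pvP t n then some n else none) from funext fun n => by
        simp [PySem.Dict.contains_empty, pvP, pvElig]]
    exact pv_findSome?_guard (pvP t) js
  have hfb : js.findSome? (fun name =>
        if !PySem.Str.isIn "gripper" (PySem.Str.lower name) && !PySem.Str.isIn "jaw" (PySem.Str.lower name)
        then some name else none)
      = js.find? (fun n => pvElig (PySem.Str.lower n)) :=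
    pv_findSome?_guard (fun n => pvElig (PySem.Str.lower n)) js
  show (match pvCands.findSome? (fun token =>
      (PySem.Dict.items (js.foldl (fun d name => d.insert (PySem.Str.lower name) name)
          PySem.Dict.empty)).findSome? (fun kv =>
        if PySem.Str.isIn token kv.1 &&
            (!PySem.Str.isIn "gripper" kv.1 && !PySem.Str.isIn "jaw" kv.1)
        then some kv.2 else none)) with
    | some original => some original
    | none => js.findSome? (fun name =>
        if !PySem.Str.isIn "gripper" (PySem.Str.lower name) && !PySem.Str.isIn "jaw" (PySem.Str.lower name)
        then some name else none))
    = pvAnorm js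
  rw [show (fun token =>
      (PySem.Dict.items (js.foldl (fun d name => d.insert (PySem.Str.lower name) name)
          PySem.Dict.empty)).findSome? (fun kv =>
        if PySem.Str.isIn token kv.1 &&
            (!PySem.Str.isIn "gripper" kv.1 && !PySem.Str.isIn "jaw" kv.1)
        then some kv.2 else none))
      = (fun token => js.find? (pvP token)) from funext hscan]
  rw [hfb]
  rfl

-- ===== VERDICT (by name: the statement is the Claim_ definition above) =====
theorem find_left_turn_joint_py_spec : Claim_equal_find_left_turn_joint_py := by
  intro js _ hpre
  unfold Spec_find_left_turn_joint_py
  rw [portA_eq js hpre, pv_norm_eq, portB_eq]
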